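-- pv_equiv track=rewrite | github.com/ZeMarques96/Python-Aprendizado | Professor Luiz Otávio/aula80.py | segunda_ocorrencia
-- ===== SOURCE A (Python) =====
-- def segunda_ocorrencia(repetidos, lista):
--     primeira_ocorrencia = 0
--     slots = len(lista)
--     for controle_repetidos in repetidos:
--         repete_qnt = 0
--         for numeros in lista:
--             if controle_repetidos == numeros:
--                 repete_qnt += 1
--             if repete_qnt >= 1 and controle_repetidos != numeros:
--                 repete_qnt += 1
--             if controle_repetidos == numeros and repete_qnt > 1 and repete_qnt < slots:
--                 slots = repete_qnt
--                 primeira_ocorrencia = controle_repetidos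
--                 break
--     if primeira_ocorrencia == 0:
--         primeira_ocorrencia = -1
--     return primeira_ocorrencia
-- ===== SOURCE B (Python) =====
-- def segunda_ocorrencia(repetidos, lista):
--     # One pass over lista: record each value's first index, and at its second
--     # occurrence the span (second - first + 1).  Then O(1) lookups per candidate.
--     first = {}
--     span = {}
--     for i, x in enumerate(lista):
--         if x in first:
--             if x not in span:
--                 span[x] = i - first[x] + 1
--         else:
--             first[x] = i
--     best = len(lista)
--     ans = 0
--     for v in repetidos:
--         s = span.get(v)
--         if s is not None and s < best:
--             best = s
--             ans = v
--     return ans if ans != 0 else -1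
-- ===== Notes on version B (the rewrite author's own statement) =====
-- stated objective: faster
-- what changed: B replaces A's rescan of the whole list for every candidate (with a hand-maintained distance counter) by one pass over lista that records each value's first index and first-to-second span in dicts, then a single O(1)-lookup pass over repetidos.
import Mathlib
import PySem

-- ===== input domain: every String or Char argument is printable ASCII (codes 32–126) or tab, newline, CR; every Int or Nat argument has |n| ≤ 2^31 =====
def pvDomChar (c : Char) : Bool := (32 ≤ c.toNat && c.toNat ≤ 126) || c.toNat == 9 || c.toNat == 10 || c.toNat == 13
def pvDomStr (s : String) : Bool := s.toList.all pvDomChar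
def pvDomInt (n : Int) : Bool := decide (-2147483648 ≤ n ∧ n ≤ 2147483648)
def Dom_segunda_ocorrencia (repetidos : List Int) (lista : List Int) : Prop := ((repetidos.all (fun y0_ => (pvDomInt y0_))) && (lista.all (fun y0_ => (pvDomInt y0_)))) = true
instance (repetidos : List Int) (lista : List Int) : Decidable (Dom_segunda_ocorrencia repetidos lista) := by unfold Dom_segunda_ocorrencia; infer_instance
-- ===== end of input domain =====

-- B builds per-value first-index / first-to-second-span dicts in one pass instead of
-- rescanning lista for every candidate (objective: faster, asymptotic).

-- ===== PORT A =====
-- inner 'for numeros in lista' loop; returns some q if the break fired (q = repete_qnt then)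
def segRow (v : Int) (slots : Int) : List Int → Int → Option Int
  | [], _ => none
  | x :: xs, qnt =>
    let q1 := if v = x then qnt + 1 else qnt
    let q2 := if 1 ≤ q1 ∧ v ≠ x then q1 + 1 else q1
    if v = x ∧ 1 < q2 ∧ q2 < slots then some q2
    else segRow v slots xs q2

-- outer 'for controle_repetidos in repetidos' loop; state (primeira_ocorrencia, slots)
def segOuter (lista : List Int) : List Int → Int × Int → Int × Int
  | [], st => st
  | v :: vs, st =>
    match segRow v st.2 lista 0 with
    | some q => segOuter lista vs (v, q)
    | none => segOuter lista vs st

def segunda_ocorrencia (repetidos : List Int) (lista : List Int) : Int :=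
  let st := segOuter lista repetidos (0, (lista.length : Int))
  if st.1 = 0 then -1 else st.1

-- ===== PORT B =====
-- the 'for i, x in enumerate(lista)' loop building (first, span)
def altDicts (lista : List Int) : PySem.Dict Int Int × PySem.Dict Int Int :=
  (PySem.List.enumerate lista 0).foldl
    (fun fs p =>
      if fs.1.contains p.2 then
        if fs.2.contains p.2 then fs
        else (fs.1, fs.2.insert p.2 (p.1 - fs.1.getD p.2 0 + 1))
      else (fs.1.insert p.2 p.1, fs.2))
    (PySem.Dict.empty, PySem.Dict.empty)

-- the 'for v in repetidos' selection loop; state (best, ans)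
def altSelect (span : PySem.Dict Int Int) : List Int → Int × Int → Int × Int
  | [], st => st
  | v :: vs, st =>
    match span.get? v with
    | some s => if s < st.1 then altSelect span vs (s, v) else altSelect span vs st
    | none => altSelect span vs st

def segunda_ocorrencia_alt (repetidos : List Int) (lista : List Int) : Int :=
  let span := (altDicts lista).2
  let st := altSelect span repetidos ((lista.length : Int), 0)
  if st.2 ≠ 0 then st.2 else -1

-- ===== PRECONDITION & SPEC =====
def Spec_segunda_ocorrencia (repetidos : List Int) (lista : List Int) (out : Int) : Prop := out = segunda_ocorrencia_alt repetidos lista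
instance (repetidos : List Int) (lista : List Int) (out : Int) : Decidable (Spec_segunda_ocorrencia repetidos lista out) := by unfold Spec_segunda_ocorrencia; infer_instance

-- ===== CLAIM (what is proved, stated in full; the proofs are below) =====
def Claim_equal_segunda_ocorrencia : Prop := ∀ (repetidos : List Int) (lista : List Int), Dom_segunda_ocorrencia repetidos lista → Spec_segunda_ocorrencia repetidos lista (segunda_ocorrencia repetidos lista)

-- ===== LEMMAS AND PROOFS =====

-- index (as Int) of the first occurrence of v
def idxI (v : Int) : List Int → Option Int
  | [] => none
  | x :: xs => if x = v then some 0 else (idxI v xs).map (· + 1)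

-- span = (second occurrence index) - (first occurrence index) + 1, if v occurs twice
def span2 (v : Int) : List Int → Option Int
  | [] => none
  | x :: xs => if x = v then (idxI v xs).map (· + 2) else span2 v xs

theorem idxI_nonneg (v : Int) (l : List Int) (d : Int) (h : idxI v l = some d) : 0 ≤ d := by
  induction l generalizing d with
  | nil => simp [idxI] at h
  | cons x xs ih =>
    by_cases hx : x = v
    · simp [idxI, hx] at h; omega
    · simp [idxI, hx] at h
      obtain ⟨d', hd', rfl⟩ := h
      have := ih d' hd'; omega

-- phase after the first occurrence: qnt ≥ 1 grows by 1 each step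
theorem segRow_phase2 (v slots : Int) (xs : List Int) (q : Int) (hq : 1 ≤ q) :
    segRow v slots xs q =
      (match idxI v xs with
       | some d => if q + d + 1 < slots then some (q + d + 1) else none
       | none => none) := by
  induction xs generalizing q with
  | nil => simp [segRow, idxI]
  | cons x xs ih =>
    by_cases hx : v = x
    · subst hx
      simp only [segRow, idxI, if_pos rfl]
      have h1 : (if v = v then q + 1 else q) = q + 1 := by simp
      by_cases hlt : q + 1 < slots
      · simp [hlt, hq]; omega
      · have : ¬ (v = v ∧ 1 < (if 1 ≤ q + 1 ∧ v ≠ v then q + 1 + 1 else q + 1) ∧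
            (if 1 ≤ q + 1 ∧ v ≠ v then q + 1 + 1 else q + 1) < slots) := by
          simp; omega
        simp only [h1, if_neg this, reduceIte, ne_eq, not_true_eq_false, and_false, false_and]
        rw [ih (q + 1) (by omega)]
        cases h : idxI v xs with
        | none => simp [hlt]
        | some d =>
          have hd := idxI_nonneg v xs d h
          simp only []
          have : ¬ (q + 1 + d + 1 < slots) := by omega
          simp [this, hlt]
    · have hx' : ¬ x = v := fun h => hx h.symm
      have hs : segRow v slots (x :: xs) q = segRow v slots xs (q + 1) := by
        simp [segRow, hx, hq]
      rw [hs, ih (q + 1) (by omega)]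
      cases h : idxI v xs with
      | none => simp [idxI, hx', h]
      | some d =>
        simp only [idxI, if_neg hx', h, Option.map_some]
        rw [show q + 1 + d + 1 = q + (d + 1) + 1 by ring]

theorem segRow_eq (v slots : Int) (l : List Int) :
    segRow v slots l 0 =
      (match span2 v l with
       | some s => if s < slots then some s else none
       | none => none) := by
  induction l with
  | nil => simp [segRow, span2]
  | cons x xs ih =>
    by_cases hx : v = x
    · subst hx
      have hs : segRow v slots (v :: xs) 0 = segRow v slots xs 1 := by
        simp [segRow]
      rw [hs, segRow_phase2 v slots xs 1 (by omega)]
      simp only [span2, if_pos rfl]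
      cases h : idxI v xs with
      | none => simp [h]
      | some d =>
        simp only [h, Option.map_some]
        rw [show 1 + d + 1 = d + 2 by ring]
        simp
    · have hx' : ¬ x = v := fun h => hx h.symm
      have hs : segRow v slots (x :: xs) 0 = segRow v slots xs 0 := by
        simp [segRow, hx]
      rw [hs, ih]
      simp [span2, hx']

theorem idxI_append_singleton (v x : Int) (l : List Int) :
    idxI v (l ++ [x]) =
      (match idxI v l with
       | some d => some d
       | none => if x = v then some (l.length : Int) else none) := by
  induction l with
  | nil => simp [idxI]
  | cons y ys ih =>
    by_cases hy : y = v
    · simp [idxI, hy]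
    · simp only [List.cons_append, idxI, if_neg hy, ih]
      cases h : idxI v ys with
      | some d => simp
      | none =>
        by_cases hx : x = v
        · simp [hx]
        · simp [hx]

theorem span2_append_singleton (v x : Int) (l : List Int) :
    span2 v (l ++ [x]) =
      (match span2 v l with
       | some s => some s
       | none =>
         match idxI v l with
         | some i => if x = v then some ((l.length : Int) - i + 1) else none
         | none => none) := by
  induction l with
  | nil => simp [span2, idxI]
  | cons y ys ih =>
    by_cases hy : y = v
    · simp only [List.cons_append, span2, idxI, if_pos hy, idxI_append_singleton]
      cases h : idxI v ys with
      | some d => simp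
      | none =>
        by_cases hx : x = v
        · simp [hx]; ring
        · simp [hx]
    · simp only [List.cons_append, span2, idxI, if_neg hy, ih]
      cases h : span2 v ys with
      | some s => simp
      | none =>
        cases h2 : idxI v ys with
        | none => simp
        | some i =>
          by_cases hx : x = v
          · simp [hx]
          · simp [hx]

theorem altDicts_get (lista : List Int) (v : Int) :
    (altDicts lista).1.get? v = idxI v lista ∧ (altDicts lista).2.get? v = span2 v lista := by
  induction lista using List.reverseRecOn generalizing v with
  | nil => simp [altDicts, PySem.List.enumerate, PySem.Dict.get?_empty, idxI, span2]
  | append_singleton l x ih =>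
    have hen : PySem.List.enumerate (l ++ [x]) 0 =
        PySem.List.enumerate l 0 ++ [((l.length : Int), x)] := by
      rw [PySem.List.enumerate_append]
      simp [PySem.List.enumerate_cons, PySem.List.enumerate_nil]
    have hstep : altDicts (l ++ [x]) =
        (fun fs (p : Int × Int) =>
          if fs.1.contains p.2 then
            if fs.2.contains p.2 then fs
            else (fs.1, fs.2.insert p.2 (p.1 - fs.1.getD p.2 0 + 1))
          else (fs.1.insert p.2 p.1, fs.2)) (altDicts l) ((l.length : Int), x) := by
      unfold altDicts
      rw [hen, List.foldl_append, List.foldl_cons, List.foldl_nil]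
    have hF : (altDicts l).1.get? x = idxI x l := (ih x).1
    have hS : (altDicts l).2.get? x = span2 x l := (ih x).2
    rw [hstep]
    by_cases hc1 : (altDicts l).1.contains x = true
    · have hidx : (idxI x l).isSome := by
        rw [← hF, ← PySem.Dict.contains_eq_isSome_get?]; exact hc1
      obtain ⟨i, hi⟩ := Option.isSome_iff_exists.mp hidx
      by_cases hc2 : (altDicts l).2.contains x = true
      · have hsp : (span2 x l).isSome := by
          rw [← hS, ← PySem.Dict.contains_eq_isSome_get?]; exact hc2
        obtain ⟨s, hs⟩ := Option.isSome_iff_exists.mp hsp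
        simp only [hc1, hc2, if_true]
        refine ⟨?_, ?_⟩
        · rw [(ih v).1, idxI_append_singleton]
          by_cases hv : v = x
          · subst hv; simp [hi]
          · cases h : idxI v l with
            | some d => simp
            | none =>
              have : ¬ x = v := fun h' => hv h'.symm
              simp [this]
        · rw [(ih v).2, span2_append_singleton]
          by_cases hv : v = x
          · subst hv; simp [hs]
          · cases h : span2 v l with
            | some s' => simp
            | none =>
              cases h2 : idxI v l with
              | none => simp
              | some i' =>
                have : ¬ x = v := fun h' => hv h'.symm
                simp [this]
      · have hc2' : (altDicts l).2.contains x = false := by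
          cases h : (altDicts l).2.contains x with
          | true => exact absurd h hc2
          | false => rfl
        have hsp : span2 x l = none := by
          rw [← hS]
          exact (PySem.Dict.get?_eq_none_iff_contains _ _).mpr hc2'
        simp only [hc1, hc2', if_true, Bool.false_eq_true, if_false]
        refine ⟨?_, ?_⟩
        · rw [(ih v).1, idxI_append_singleton]
          by_cases hv : v = x
          · subst hv; simp [hi]
          · cases h : idxI v l with
            | some d => simp
            | none =>
              have : ¬ x = v := fun h' => hv h'.symm
              simp [this]
        · rw [PySem.Dict.get?_insert]
          by_cases hv : v = x
          · subst hv
            rw [span2_append_singleton, hsp, hi]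
            have hgd : (altDicts l).1.getD v 0 = i := by
              rw [PySem.Dict.getD_eq_get?_getD, hF, hi]; rfl
            simp only [if_pos rfl, hgd]
            simp
          · rw [if_neg hv, (ih v).2, span2_append_singleton]
            cases h : span2 v l with
            | some s' => simp
            | none =>
              cases h2 : idxI v l with
              | none => simp
              | some i' =>
                have : ¬ x = v := fun h' => hv h'.symm
                simp [this]
    · have hc1' : (altDicts l).1.contains x = false := by
        cases h : (altDicts l).1.contains x with
        | true => exact absurd h hc1
        | false => rfl
      have hidx : idxI x l = none := by
        rw [← hF]
        exact (PySem.Dict.get?_eq_none_iff_contains _ _).mpr hc1'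
      have hsp : span2 x l = none := by
        -- no first occurrence ⇒ no span
        clear hstep hF hS hc1 hc1' ih hen
        induction l with
        | nil => simp [span2]
        | cons y ys ihl =>
          by_cases hy : y = x
          · simp [idxI, hy] at hidx
          · simp only [idxI, if_neg hy] at hidx
            simp only [span2, if_neg hy]
            exact ihl (by simpa using hidx)
      simp only [hc1', Bool.false_eq_true, if_false]
      refine ⟨?_, ?_⟩
      · rw [PySem.Dict.get?_insert]
        by_cases hv : v = x
        · subst hv
          rw [idxI_append_singleton, hidx]
          simp
        · rw [if_neg hv, (ih v).1, idxI_append_singleton]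
          cases h : idxI v l with
          | some d => simp
          | none =>
            have : ¬ x = v := fun h' => hv h'.symm
            simp [this]
      · rw [(ih v).2, span2_append_singleton]
        by_cases hv : v = x
        · subst hv; rw [hidx, hsp]
        · cases h : span2 v l with
          | some s' => simp
          | none =>
            cases h2 : idxI v l with
            | none => simp
            | some i' =>
              have : ¬ x = v := fun h' => hv h'.symm
              simp [this]

theorem outer_eq (lista : List Int) (vs : List Int) (p s : Int) :
    segOuter lista vs (p, s) = Prod.swap (altSelect (altDicts lista).2 vs (s, p)) := by
  induction vs generalizing p s with
  | nil => rfl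
  | cons v vs ih =>
    simp only [segOuter, altSelect]
    rw [segRow_eq, (altDicts_get lista v).2]
    cases h : span2 v lista with
    | none => exact ih p s
    | some t =>
      by_cases ht : t < s
      · simp only [if_pos ht]; exact ih v t
      · simp only [if_neg ht]; exact ih p s

theorem final_eq (st : Int × Int) :
    (if (Prod.swap st).1 = 0 then (-1 : Int) else (Prod.swap st).1) =
      if st.2 ≠ 0 then st.2 else -1 := by
  obtain ⟨b, p⟩ := st
  by_cases h : p = 0 <;> simp [h]

-- ===== VERDICT (by name: the statement is the Claim_ definition above) =====
theorem segunda_ocorrencia_spec : Claim_equal_segunda_ocorrencia := by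
  intro repetidos lista _
  unfold Spec_segunda_ocorrencia segunda_ocorrencia segunda_ocorrencia_alt
  rw [outer_eq lista repetidos 0 (lista.length : Int)]
  exact final_eq _
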